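-- pv_equiv track=rewrite | github.com/stat-thon/Coding-Test-Study-2nd | Dawny/Programmers/10TH/LV2/firerollcake.py | solution
-- ===== SOURCE A (Python) =====
-- def solution(topping):
--     if len(set(topping)) == 1:
--         return len(set(topping)) - 1
--     s = {}
--     f = set()
--     cnt = 0
--
--     for i in topping:
--         s[str(i)] = s.get(str(i), 0)
--         s[str(i)] += 1
--
--     for i in topping:
--         f.add(i)
--         s[str(i)] -= 1
--         if s[str(i)] == 0:
--             del s[str(i)]
--         if len(f) == len(s.keys()):
--             cnt += 1
--         elif len(f) > len(s):
--             break
--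
--     return cnt
-- ===== SOURCE B (Python) =====
-- def solution(topping):
--     # suffix pass: suf[i] = number of distinct toppings in topping[i:]
--     seen = set()
--     suf = []
--     for x in reversed(topping):
--         seen.add(x)
--         suf.append(len(seen))
--     suf.reverse()
--     # prefix pass: count split points where distinct(left) == distinct(right)
--     pref = set()
--     cnt = 0
--     for x, right in zip(topping, suf[1:]):
--         pref.add(x)
--         if len(pref) == right:
--             cnt += 1
--     return cnt
-- ===== Notes on version B (the rewrite author's own statement) =====
-- stated objective: faster
-- what changed: Replaces A's forward scan that maintains a string-keyed multiset counter of the remaining part (with an early break) by two set-only passes: a right-to-left pass building a suffix distinct-count array, then a left-to-right prefix-set pass comparing against it; A's all-same-topping special case is dropped as a bug fix.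
-- intended difference: On lists of length >= 2 whose elements are all equal, A's special-case guard returns 0, while B returns len(topping)-1; every such split gives one distinct topping on each side, so B's count is the intended answer. — e.g. on solution([1, 1]): A returns 0, B returns 1
import Mathlib
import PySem

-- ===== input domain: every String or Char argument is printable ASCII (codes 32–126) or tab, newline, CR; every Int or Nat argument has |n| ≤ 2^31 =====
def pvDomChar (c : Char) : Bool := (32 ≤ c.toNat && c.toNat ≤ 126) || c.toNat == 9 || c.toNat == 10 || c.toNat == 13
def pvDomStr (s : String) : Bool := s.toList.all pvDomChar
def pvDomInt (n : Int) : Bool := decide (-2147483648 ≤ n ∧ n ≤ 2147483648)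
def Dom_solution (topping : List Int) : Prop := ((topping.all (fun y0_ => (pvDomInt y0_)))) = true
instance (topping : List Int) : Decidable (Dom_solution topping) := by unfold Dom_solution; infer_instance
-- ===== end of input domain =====

-- B replaces A's forward scan over a string-keyed counter of the remainder (with early break) by a
-- suffix distinct-count array plus a prefix-set scan, and intentionally drops A's all-same guard
-- (see D_solution). Same O(n) cost; equivalence is about the return value only.

-- ===== PORT A =====
-- first loop of A: s[str(i)] = s.get(str(i), 0); s[str(i)] += 1
def solutionCntAdd (d : PySem.Dict String Int) (i : Int) : PySem.Dict String Int :=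
  let d1 := d.insert (PySem.Int.toStr i) (d.getD (PySem.Int.toStr i) 0)
  d1.insert (PySem.Int.toStr i) (d1.getD (PySem.Int.toStr i) 0 + 1)

-- second loop of A: for i in topping: f.add(i); s[str(i)] -= 1; if s[str(i)] == 0: del s[str(i)];
-- if len(f) == len(s.keys()): cnt += 1; elif len(f) > len(s): break
-- (s[str(i)] -= 1 is read with getD: the key is always present when Python executes it, so this is exact)
def solutionLoopA : List Int → PySem.Set Int → PySem.Dict String Int → Int → Int
  | [], _, _, cnt => cnt
  | i :: rest, f, s, cnt =>
    let f' := PySem.Set.add f i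
    let s1 := s.insert (PySem.Int.toStr i) (s.getD (PySem.Int.toStr i) 0 - 1)
    let s2 := if s1.getD (PySem.Int.toStr i) 0 == 0 then s1.erase (PySem.Int.toStr i) else s1
    if f'.length == s2.size then solutionLoopA rest f' s2 (cnt + 1)
    else if s2.size < f'.length then cnt
    else solutionLoopA rest f' s2 cnt

def solution (topping : List Int) : Int :=
  if (PySem.Set.ofList topping).length == 1 then
    ((PySem.Set.ofList topping).length : Int) - 1
  else
    let s : PySem.Dict String Int := topping.foldl solutionCntAdd PySem.Dict.empty
    solutionLoopA topping PySem.Set.empty s 0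

-- ===== PORT B =====
-- loop body of B's suffix pass: seen.add(x); suf.append(len(seen))
def solutionSufStep (st : PySem.Set Int × List Nat) (x : Int) : PySem.Set Int × List Nat :=
  let seen := PySem.Set.add st.1 x
  (seen, st.2 ++ [seen.length])

-- loop body of B's prefix pass: pref.add(x); if len(pref) == right: cnt += 1
def solutionCntStep (st : PySem.Set Int × Int) (xr : Int × Nat) : PySem.Set Int × Int :=
  let pref := PySem.Set.add st.1 xr.1
  (pref, if pref.length == xr.2 then st.2 + 1 else st.2)

def solution_alt (topping : List Int) : Int :=
  -- for x in reversed(topping): seen.add(x); suf.append(len(seen)); then suf.reverse()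
  let built := topping.reverse.foldl solutionSufStep (PySem.Set.empty, [])
  let suf := built.2.reverse
  -- for x, right in zip(topping, suf[1:]): pref.add(x); if len(pref) == right: cnt += 1
  let fin := (topping.zip (suf.drop 1)).foldl solutionCntStep (PySem.Set.empty, 0)
  fin.2

-- ===== PRECONDITION & SPEC =====
-- On lists of length >= 2 whose elements are all equal, A's special-case guard returns 0, while B
-- returns len(topping)-1; every such split gives one distinct topping on each side, so B's count is
-- the intended answer.
def D_solution (topping : List Int) : Prop :=
  2 ≤ topping.length ∧ ∀ x ∈ topping, ∀ y ∈ topping, x = y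
instance (topping : List Int) : Decidable (D_solution topping) := by unfold D_solution; infer_instance

def Spec_solution (topping : List Int) (out : Int) : Prop := ¬ D_solution topping → out = solution_alt topping
instance (topping : List Int) (out : Int) : Decidable (Spec_solution topping out) := by unfold Spec_solution; infer_instance

def pvDiffWitness_solution : List Int := [1, 1]
def pvDiffWitnessOut_solution : Int × Int := (0, 1)

-- ===== CLAIM (what is proved, stated in full; the proofs are below) =====
def Claim_unchanged_solution : Prop := ∀ (topping : List Int), Dom_solution topping → Spec_solution topping (solution topping)
def Claim_changed_solution : Prop := Dom_solution (pvDiffWitness_solution) ∧ D_solution (pvDiffWitness_solution) ∧ solution (pvDiffWitness_solution) = pvDiffWitnessOut_solution.1 ∧ solution_alt (pvDiffWitness_solution) = pvDiffWitnessOut_solution.2 ∧ pvDiffWitnessOut_solution.1 ≠ pvDiffWitnessOut_solution.2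
def Claim_exact_solution : Prop := ∀ (topping : List Int), Dom_solution topping → D_solution topping → solution topping ≠ solution_alt topping

-- ===== LEMMAS AND PROOFS =====

theorem digitChar_inj {a b : Nat} (ha : a < 10) (hb : b < 10)
    (h : Nat.digitChar a = Nat.digitChar b) : a = b := by
  interval_cases a <;> interval_cases b <;> simp_all [Nat.digitChar]

theorem toDigits_ne_nil (n : Nat) : Nat.toDigits 10 n ≠ [] := by
  rw [Nat.toDigits_eq_if (by norm_num)]
  split <;> simp

theorem toDigits10_inj : ∀ m n : Nat, Nat.toDigits 10 m = Nat.toDigits 10 n → m = n := by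
  intro m
  induction m using Nat.strong_induction_on with
  | _ m ih =>
    intro n h
    by_cases hm : m < 10 <;> by_cases hn : n < 10
    · rw [Nat.toDigits_of_lt_base hm, Nat.toDigits_of_lt_base hn] at h
      simp only [List.cons.injEq, and_true] at h
      exact digitChar_inj hm hn h
    · have em : Nat.toDigits 10 m = [m.digitChar] := Nat.toDigits_of_lt_base hm
      have en : Nat.toDigits 10 n = Nat.toDigits 10 (n / 10) ++ [(n % 10).digitChar] :=
        Nat.toDigits_of_base_le (by norm_num) (by omega)
      rw [em, en] at h
      have hlen := congrArg List.length h
      have hpos : 0 < (Nat.toDigits 10 (n / 10)).length :=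
        List.length_pos_iff.mpr (toDigits_ne_nil _)
      simp only [List.length_cons, List.length_nil, List.length_append] at hlen
      omega
    · have em : Nat.toDigits 10 m = Nat.toDigits 10 (m / 10) ++ [(m % 10).digitChar] :=
        Nat.toDigits_of_base_le (by norm_num) (by omega)
      have en : Nat.toDigits 10 n = [n.digitChar] := Nat.toDigits_of_lt_base hn
      rw [em, en] at h
      have hlen := congrArg List.length h
      have hpos : 0 < (Nat.toDigits 10 (m / 10)).length :=
        List.length_pos_iff.mpr (toDigits_ne_nil _)
      simp only [List.length_cons, List.length_nil, List.length_append] at hlen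
      omega
    · have em : Nat.toDigits 10 m = Nat.toDigits 10 (m / 10) ++ [(m % 10).digitChar] :=
        Nat.toDigits_of_base_le (by norm_num) (by omega)
      have en : Nat.toDigits 10 n = Nat.toDigits 10 (n / 10) ++ [(n % 10).digitChar] :=
        Nat.toDigits_of_base_le (by norm_num) (by omega)
      rw [em, en] at h
      have h2 := congrArg List.reverse h
      simp only [List.reverse_append, List.reverse_cons, List.reverse_nil, List.nil_append,
        List.cons_append, List.cons.injEq] at h2
      have hmod : m % 10 = n % 10 :=
        digitChar_inj (Nat.mod_lt _ (by norm_num)) (Nat.mod_lt _ (by norm_num)) h2.1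
      have hdiv : m / 10 = n / 10 :=
        ih (m / 10) (Nat.div_lt_self (by omega) (by norm_num)) _
          (List.reverse_inj.mp h2.2)
      omega

theorem minus_notin_toDigits (n : Nat) : '-' ∉ Nat.toDigits 10 n := by
  induction n using Nat.strong_induction_on with
  | _ n ih =>
    by_cases h : n < 10
    · rw [Nat.toDigits_of_lt_base h]
      interval_cases n <;> simp [Nat.digitChar]
    · have en : Nat.toDigits 10 n = Nat.toDigits 10 (n / 10) ++ [(n % 10).digitChar] :=
        Nat.toDigits_of_base_le (by norm_num) (by omega)
      rw [en]
      intro hm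
      rcases List.mem_append.mp hm with h1 | h1
      · exact ih (n / 10) (Nat.div_lt_self (by omega) (by norm_num)) h1
      · have h2 : n % 10 < 10 := Nat.mod_lt _ (by norm_num)
        simp only [List.mem_singleton] at h1
        revert h1
        interval_cases h3 : n % 10 <;> simp [Nat.digitChar]

theorem toStr_inj {m n : Int} (h : PySem.Int.toStr m = PySem.Int.toStr n) : m = n := by
  have h2 : PySem.Int.toChars m = PySem.Int.toChars n := by
    have := congrArg String.toList h
    simpa [PySem.Int.toList_toStr] using this
  unfold PySem.Int.toChars at h2
  by_cases hm : m < 0 <;> by_cases hn : n < 0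
  · simp only [if_pos hm, if_pos hn, List.cons.injEq, true_and] at h2
    have := toDigits10_inj _ _ h2
    omega
  · simp only [if_pos hm, if_neg hn] at h2
    exact absurd (h2 ▸ List.mem_cons_self) (minus_notin_toDigits n.toNat)
  · simp only [if_neg hm, if_pos hn] at h2
    exact absurd (h2.symm ▸ List.mem_cons_self) (minus_notin_toDigits m.toNat)
  · simp only [if_neg hm, if_neg hn] at h2
    have := toDigits10_inj _ _ h2
    omega

theorem find?_filter_ne {κ ν : Type} [BEq κ] [LawfulBEq κ] (l : List (κ × ν)) (k k' : κ)
    (hne : k' ≠ k) :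
    (l.filter (fun p => !p.1 == k)).find? (fun p => p.1 == k') = l.find? (fun p => p.1 == k') := by
  induction l with
  | nil => rfl
  | cons a l ih =>
    by_cases h1 : a.1 = k
    · have h2 : ¬ a.1 = k' := fun hh => hne (hh ▸ h1)
      simp [List.filter_cons, List.find?_cons, h1, h2, ih, beq_iff_eq, Ne.symm hne]
    · by_cases h2 : a.1 = k'
      · simp [List.filter_cons, List.find?_cons, h1, h2, hne, beq_iff_eq]
      · simp [List.filter_cons, List.find?_cons, h1, h2, ih]

theorem get?_erase_self {κ ν : Type} [BEq κ] [LawfulBEq κ] (d : PySem.Dict κ ν) (k : κ) :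
    (d.erase k).get? k = none := by
  simp only [PySem.Dict.erase, PySem.Dict.get?, Option.map_eq_none_iff, List.find?_eq_none]
  intro p hp
  have := List.of_mem_filter hp
  simpa using this

theorem get?_erase_of_ne {κ ν : Type} [BEq κ] [LawfulBEq κ] (d : PySem.Dict κ ν) (k k' : κ)
    (hne : k' ≠ k) : (d.erase k).get? k' = d.get? k' := by
  simp only [PySem.Dict.erase, PySem.Dict.get?]
  rw [find?_filter_ne _ _ _ hne]

theorem keys_erase {κ ν : Type} [BEq κ] [LawfulBEq κ] (d : PySem.Dict κ ν) (k : κ) :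
    (d.erase k).keys = d.keys.filter (fun x => !x == k) := by
  simp only [PySem.Dict.erase, PySem.Dict.keys]
  induction d.items with
  | nil => rfl
  | cons a l ih =>
    by_cases h : a.1 = k
    · rw [List.filter_cons_of_neg (by simp [h]), List.map_cons,
        List.filter_cons_of_neg (by simp [h])]
      exact ih
    · rw [List.filter_cons_of_pos (by simp [h]), List.map_cons, List.map_cons,
        List.filter_cons_of_pos (by simp [h])]
      simpa using ih

theorem nodup_keys_erase {κ ν : Type} [BEq κ] [LawfulBEq κ] (d : PySem.Dict κ ν) (k : κ)
    (h : d.keys.Nodup) : (d.erase k).keys.Nodup := by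
  rw [keys_erase]
  exact h.filter _

theorem size_eq_keys_length {κ ν : Type} (d : PySem.Dict κ ν) : d.size = d.keys.length := by
  simp [PySem.Dict.size, PySem.Dict.keys]
-- distinct count of a list
def Dl (l : List Int) : Nat := (PySem.Set.ofList l).length

-- match count with A's break (prefix p already eaten, r remaining)
def cmBr : List Int → List Int → Nat
  | _, [] => 0
  | p, x :: r =>
    if Dl (p ++ [x]) = Dl r then 1 + cmBr (p ++ [x]) r
    else if Dl r < Dl (p ++ [x]) then 0
    else cmBr (p ++ [x]) r

-- match count, no break
def cmNB : List Int → List Int → Nat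
  | _, [] => 0
  | p, x :: r => (if Dl (p ++ [x]) = Dl r then 1 else 0) + cmNB (p ++ [x]) r

-- suffix distinct counts: (sufL l)[i] = Dl (l.drop i)
def sufL : List Int → List Nat
  | [] => []
  | x :: r => Dl (x :: r) :: sufL r

theorem Dl_eq_card (l : List Int) : Dl l = l.toFinset.card := by
  have h2 : (PySem.Set.ofList l).toFinset = l.toFinset := by
    ext a; simp [List.mem_toFinset, PySem.Set.mem_ofList]
  rw [Dl, ← List.toFinset_card_of_nodup (PySem.Set.nodup_ofList l), h2]

theorem Dl_append_le (p q : List Int) : Dl p ≤ Dl (p ++ q) := by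
  rw [Dl_eq_card, Dl_eq_card]
  exact Finset.card_le_card (by intro a; simp; tauto)

theorem Dl_cons_le (x : Int) (r : List Int) : Dl r ≤ Dl (x :: r) := by
  rw [Dl_eq_card, Dl_eq_card]
  exact Finset.card_le_card (by intro a; simp; tauto)

theorem Dl_pos (l : List Int) (h : l ≠ []) : 0 < Dl l := by
  rw [Dl_eq_card, Finset.card_pos]
  obtain ⟨x, hx⟩ := List.exists_mem_of_ne_nil l h
  exact ⟨x, by simpa using hx⟩

theorem Dl_one_of_allEq (l : List Int) (hne : l ≠ []) (hall : ∀ x ∈ l, ∀ y ∈ l, x = y) :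
    Dl l = 1 := by
  obtain ⟨a, ha⟩ := List.exists_mem_of_ne_nil l hne
  rw [Dl_eq_card, Finset.card_eq_one]
  refine ⟨a, ?_⟩
  ext b
  simp only [List.mem_toFinset, Finset.mem_singleton]
  exact ⟨fun hb => hall b hb a ha, fun hb => hb ▸ ha⟩

theorem allEq_of_Dl_one (l : List Int) (h : Dl l = 1) :
    l ≠ [] ∧ ∀ x ∈ l, ∀ y ∈ l, x = y := by
  rw [Dl_eq_card, Finset.card_eq_one] at h
  obtain ⟨a, ha⟩ := h
  constructor
  · intro hl; rw [hl] at ha; simp at ha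
  · intro x hx y hy
    have h1 : x ∈ l.toFinset := by simpa using hx
    have h2 : y ∈ l.toFinset := by simpa using hy
    rw [ha] at h1 h2
    simp at h1 h2; omega

theorem cmNB_zero (r : List Int) : ∀ p, Dl r < Dl p → cmNB p r = 0 := by
  induction r with
  | nil => intro p _; rfl
  | cons x r ih =>
    intro p h
    have h1 : Dl r < Dl (p ++ [x]) :=
      lt_of_le_of_lt (Dl_cons_le x r) (lt_of_lt_of_le h (Dl_append_le p [x]))
    rw [cmNB, if_neg (fun hh => absurd hh (Nat.ne_of_lt' h1)), ih (p ++ [x]) h1]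

theorem cmBr_eq_cmNB (r : List Int) : ∀ p, cmBr p r = cmNB p r := by
  induction r with
  | nil => intro p; rfl
  | cons x r ih =>
    intro p
    rw [cmBr, cmNB]
    by_cases heq : Dl (p ++ [x]) = Dl r
    · rw [if_pos heq, if_pos heq, ih]
    · rw [if_neg heq, if_neg heq]
      by_cases hlt : Dl r < Dl (p ++ [x])
      · rw [if_pos hlt, cmNB_zero r (p ++ [x]) hlt, Nat.zero_add]
      · rw [if_neg hlt, ih, Nat.zero_add]

theorem sufL_length (l : List Int) : (sufL l).length = l.length := by
  induction l with
  | nil => rfl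
  | cons x r ih => simp [sufL, ih]

theorem sufL_getElem (l : List Int) : ∀ (i : Nat) (h : i < l.length),
    (sufL l)[i]'(by rw [sufL_length]; exact h) = Dl (l.drop i) := by
  induction l with
  | nil => intro i h; simp at h
  | cons x r ih =>
    intro i h
    cases i with
    | zero => simp [sufL]
    | succ j => simpa [sufL] using ih j (by simpa using h)

theorem bfold (ys : List Int) : ∀ (s : PySem.Set Int) (acc : List Nat),
    ys.foldl solutionSufStep (s, acc) =
      (PySem.Set.update s ys,
       acc ++ (List.range ys.length).map (fun j => (PySem.Set.update s (ys.take (j + 1))).length)) := by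
  induction ys with
  | nil => intro s acc; simp [PySem.Set.update_nil]
  | cons y ys ih =>
    intro s acc
    rw [List.foldl_cons]
    show ys.foldl solutionSufStep (PySem.Set.add s y, acc ++ [(PySem.Set.add s y).length]) = _
    rw [ih]
    refine Prod.ext ?_ ?_
    · simp [PySem.Set.update_cons]
    · simp only [List.length_cons, List.range_succ_eq_map, List.map_cons, List.map_map]
      simp [PySem.Set.update_cons, PySem.Set.update_nil, Function.comp]
theorem Dl_reverse (l : List Int) : Dl l.reverse = Dl l := by
  rw [Dl_eq_card, Dl_eq_card, List.toFinset_reverse]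

theorem suf_eq (topping : List Int) :
    ((topping.reverse.foldl solutionSufStep (PySem.Set.empty, [])).2).reverse = sufL topping := by
  rw [bfold]
  apply List.ext_getElem
  · simp [sufL_length]
  · intro i h1 h2
    have hi : i < topping.length := by simpa [sufL_length] using h2
    rw [List.getElem_reverse]
    have he : PySem.Set.empty = ([] : List Int) := rfl
    simp only [he, PySem.Set.update_nil_left, List.nil_append, List.getElem_map,
      List.getElem_range, List.length_map, List.length_range, List.length_reverse]
    rw [sufL_getElem topping i hi]
    have harg : topping.length - 1 - i + 1 = topping.length - i := by omega
    rw [harg, List.take_reverse]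
    have h3 : topping.length - (topping.length - i) = i := by omega
    rw [h3]
    exact Dl_reverse _
theorem zfold (r : List Int) : ∀ (p : List Int) (c : Int),
    ((r.zip ((sufL r).drop 1)).foldl solutionCntStep (PySem.Set.ofList p, c)).2 = c + (cmNB p r : Int) := by
  induction r with
  | nil => intro p c; simp [cmNB]
  | cons x rest ih =>
    intro p c
    cases rest with
    | nil =>
      have h0 : Dl (p ++ [x]) ≠ Dl [] := by
        have h1 := Dl_pos (p ++ [x]) (by simp)
        have h2 : Dl ([] : List Int) = 0 := rfl
        omega
      simp [sufL, cmNB, h0]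
    | cons y r' =>
      have hdrop : ((sufL (x :: y :: r')).drop 1) = Dl (y :: r') :: sufL r' := by
        simp [sufL]
      rw [hdrop]
      have hzip : (x :: y :: r').zip (Dl (y :: r') :: sufL r') =
          (x, Dl (y :: r')) :: (y :: r').zip (sufL r') := by simp
      rw [hzip, List.foldl_cons]
      have hstep : solutionCntStep (PySem.Set.ofList p, c) (x, Dl (y :: r')) =
          (PySem.Set.ofList (p ++ [x]),
           if Dl (p ++ [x]) == Dl (y :: r') then c + 1 else c) := by
        simp [solutionCntStep, PySem.Set.ofList_append_singleton, Dl]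
      rw [hstep]
      have hsuf : sufL r' = (sufL (y :: r')).drop 1 := by simp [sufL]
      rw [hsuf, ih (p ++ [x])]
      conv_rhs => rw [cmNB]
      by_cases h : Dl (p ++ [x]) = Dl (y :: r')
      · simp only [h, beq_self_eq_true, if_true]
        push_cast
        ring
      · have hb : (Dl (p ++ [x]) == Dl (y :: r')) = false := by simp [h]
        simp only [hb, Bool.false_eq_true, if_false, if_neg h, Nat.zero_add]

theorem solution_alt_eq (topping : List Int) : solution_alt topping = (cmNB [] topping : Int) := by
  show ((topping.zip ((((topping.reverse.foldl solutionSufStep (PySem.Set.empty, [])).2).reverse).drop 1)).foldl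
      solutionCntStep (PySem.Set.empty, 0)).2 = _
  rw [suf_eq]
  have he : PySem.Set.empty = PySem.Set.ofList ([] : List Int) := rfl
  rw [he, zfold topping [] 0, Int.zero_add]
-- invariant of A's second loop: s maps str(x) to the multiplicity of x in the remaining suffix r
def InvS (s : PySem.Dict String Int) (r : List Int) : Prop :=
  (∀ x : Int, s.get? (PySem.Int.toStr x) =
      if 0 < r.count x then some ((r.count x : Int)) else none)
  ∧ (∀ k ∈ s.keys, ∃ x : Int, k = PySem.Int.toStr x)
  ∧ s.keys.Nodup

theorem mem_keys_iff_of_inv {s : PySem.Dict String Int} {r : List Int} (h : InvS s r)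
    (k : String) : k ∈ s.keys ↔ ∃ x : Int, k = PySem.Int.toStr x ∧ x ∈ r := by
  obtain ⟨hget, hshape, _⟩ := h
  constructor
  · intro hk
    obtain ⟨x, rfl⟩ := hshape k hk
    refine ⟨x, rfl, ?_⟩
    by_contra hx
    have hc : r.count x = 0 := List.count_eq_zero.mpr hx
    have := hget x
    rw [hc] at this
    simp only [Nat.lt_irrefl, if_false] at this
    exact (PySem.Dict.get?_eq_none_iff_not_mem_keys s _).mp (by simpa using this) hk
  · rintro ⟨x, rfl, hx⟩
    have hc : 0 < r.count x := List.count_pos_iff.mpr hx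
    have hsome : s.get? (PySem.Int.toStr x) ≠ none := by
      rw [hget x, if_pos hc]; simp
    by_contra hmem
    exact hsome ((PySem.Dict.get?_eq_none_iff_not_mem_keys s _).mpr hmem)

theorem size_of_inv {s : PySem.Dict String Int} {r : List Int} (h : InvS s r) :
    s.size = Dl r := by
  have hnd2 : ((PySem.List.dedup r).map PySem.Int.toStr).Nodup :=
    (PySem.List.nodup_dedup r).map (fun a b hab => toStr_inj hab)
  have hperm : s.keys.Perm ((PySem.List.dedup r).map PySem.Int.toStr) := by
    rw [List.perm_ext_iff_of_nodup h.2.2 hnd2]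
    intro k
    rw [mem_keys_iff_of_inv h k]
    simp only [List.mem_map, PySem.List.mem_dedup]
    exact ⟨fun ⟨x, hk, hx⟩ => ⟨x, hx, hk.symm⟩, fun ⟨x, hx, hk⟩ => ⟨x, hk.symm, hx⟩⟩
  rw [size_eq_keys_length, hperm.length_eq, List.length_map,
    PySem.List.dedup_eq_ofList]
  rfl

theorem firstpass_eq_counter (topping : List Int) :
    topping.foldl solutionCntAdd PySem.Dict.empty =
      PySem.Dict.counter (topping.map PySem.Int.toStr) := by
  have hstep : ∀ (d : PySem.Dict String Int) (i : Int),
      solutionCntAdd d i = d.insert (PySem.Int.toStr i) (d.getD (PySem.Int.toStr i) 0 + 1) := by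
    intro d i
    show (d.insert (PySem.Int.toStr i) (d.getD (PySem.Int.toStr i) 0)).insert (PySem.Int.toStr i)
        ((d.insert (PySem.Int.toStr i) (d.getD (PySem.Int.toStr i) 0)).getD (PySem.Int.toStr i) 0 + 1) =
      d.insert (PySem.Int.toStr i) (d.getD (PySem.Int.toStr i) 0 + 1)
    rw [PySem.Dict.getD_insert, if_pos rfl, PySem.Dict.insert_insert_self]
  rw [List.foldl_ext _ _ _ (fun d i _ => hstep d i)]
  rw [← PySem.Dict.foldl_insert_getD_add_one_eq_counter, List.foldl_map]

theorem inv_init (topping : List Int) :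
    InvS (topping.foldl solutionCntAdd PySem.Dict.empty) topping := by
  rw [firstpass_eq_counter]
  refine ⟨?_, ?_, PySem.Dict.nodup_keys_counter _⟩
  · intro x
    have hcnt : (topping.map PySem.Int.toStr).count (PySem.Int.toStr x) = topping.count x :=
      List.count_map_of_injective topping _ (fun a b hab => toStr_inj hab) x
    by_cases hx : x ∈ topping
    · have hmem : PySem.Int.toStr x ∈ (PySem.Dict.counter (topping.map PySem.Int.toStr)).keys := by
        rw [PySem.Dict.keys_counter, PySem.Set.mem_ofList]
        exact List.mem_map_of_mem hx
      have hsome : (PySem.Dict.counter (topping.map PySem.Int.toStr)).get? (PySem.Int.toStr x) ≠ none := by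
        simp only [Ne, PySem.Dict.get?_eq_none_iff_not_mem_keys]
        simpa using hmem
      obtain ⟨v, hv⟩ := Option.ne_none_iff_exists'.mp hsome
      have hvd : v = (topping.count x : Int) := by
        have := PySem.Dict.getD_counter (topping.map PySem.Int.toStr) (PySem.Int.toStr x)
        rw [PySem.Dict.getD_eq_get?_getD, hv] at this
        simpa [hcnt] using this
      rw [hv, hvd, if_pos (List.count_pos_iff.mpr hx)]
    · have hc : topping.count x = 0 := List.count_eq_zero.mpr hx
      rw [hc]
      simp only [Nat.lt_irrefl, if_false]
      rw [PySem.Dict.get?_eq_none_iff_not_mem_keys, PySem.Dict.keys_counter, PySem.Set.mem_ofList]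
      intro hmem
      obtain ⟨y, hy, hxy⟩ := List.mem_map.mp hmem
      exact hx (toStr_inj hxy ▸ hy)
  · intro k hk
    rw [PySem.Dict.keys_counter, PySem.Set.mem_ofList] at hk
    obtain ⟨y, _, hy⟩ := List.mem_map.mp hk
    exact ⟨y, hy.symm⟩
theorem inv_step {s : PySem.Dict String Int} {x : Int} {r' : List Int}
    (hinv : InvS s (x :: r')) :
    let s1 := s.insert (PySem.Int.toStr x) (s.getD (PySem.Int.toStr x) 0 - 1)
    InvS (if s1.getD (PySem.Int.toStr x) 0 == 0 then s1.erase (PySem.Int.toStr x) else s1) r' := by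
  intro s1
  obtain ⟨hget, hshape, hnd⟩ := hinv
  have hcx : (x :: r').count x = r'.count x + 1 := List.count_cons_self
  have hgx : s.get? (PySem.Int.toStr x) = some ((r'.count x : Int) + 1) := by
    rw [hget x, if_pos (by omega), hcx]; push_cast; ring_nf
  have hgDx : s.getD (PySem.Int.toStr x) 0 = (r'.count x : Int) + 1 := by
    rw [PySem.Dict.getD_eq_get?_getD, hgx]; rfl
  have hs1x : s1.getD (PySem.Int.toStr x) 0 = (r'.count x : Int) := by
    show (s.insert _ _).getD _ _ = _
    rw [PySem.Dict.getD_insert, if_pos rfl, hgDx]; ring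
  have hs1get : ∀ y : Int, y ≠ x → s1.get? (PySem.Int.toStr y) =
      (if 0 < r'.count y then some ((r'.count y : Int)) else none) := by
    intro y hyx
    have hne : PySem.Int.toStr y ≠ PySem.Int.toStr x := fun hh => hyx (toStr_inj hh)
    show (s.insert _ _).get? _ = _
    rw [PySem.Dict.get?_insert_of_ne _ _ hne, hget y, List.count_cons_of_ne (Ne.symm hyx)]
  have hs1shape : ∀ k ∈ s1.keys, ∃ y : Int, k = PySem.Int.toStr y := by
    intro k hk
    rcases (PySem.Dict.mem_keys_insert _ _ _ _).mp hk with h | h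
    · exact ⟨x, h⟩
    · exact hshape k h
  have hs1nd : s1.keys.Nodup := PySem.Dict.nodup_keys_insert _ _ _ hnd
  by_cases hzero : (r'.count x : Int) = 0
  · have hcond : (s1.getD (PySem.Int.toStr x) 0 == 0) = true := by
      rw [hs1x]; exact beq_iff_eq.mpr hzero
    rw [if_pos hcond]
    have hxr' : x ∉ r' := by
      rw [← List.count_eq_zero]; omega
    refine ⟨?_, ?_, nodup_keys_erase _ _ hs1nd⟩
    · intro y
      by_cases hyx : y = x
      · subst hyx
        rw [get?_erase_self]
        rw [if_neg (by rw [List.count_eq_zero.mpr hxr']; omega)]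
      · have hne : PySem.Int.toStr y ≠ PySem.Int.toStr x := fun hh => hyx (toStr_inj hh)
        rw [get?_erase_of_ne _ _ _ hne, hs1get y hyx]
    · intro k hk
      rw [keys_erase] at hk
      exact hs1shape k (List.mem_of_mem_filter hk)
  · have hcond : (s1.getD (PySem.Int.toStr x) 0 == 0) = false := by
      rw [hs1x]; exact beq_eq_false_iff_ne.mpr hzero
    rw [if_neg (by simp [hcond])]
    refine ⟨?_, hs1shape, hs1nd⟩
    intro y
    by_cases hyx : y = x
    · subst hyx
      have hpos : 0 < r'.count y := by omega
      rw [if_pos hpos]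
      show (s.insert _ _).get? _ = _
      rw [PySem.Dict.get?_insert_self, hgDx]
      congr 1; ring
    · exact hs1get y hyx

theorem loopA_eq (r : List Int) : ∀ (p : List Int) (f : PySem.Set Int)
    (s : PySem.Dict String Int) (cnt : Int), f = PySem.Set.ofList p → InvS s r →
    solutionLoopA r f s cnt = cnt + (cmBr p r : Int) := by
  induction r with
  | nil => intro p f s cnt _ _; simp [solutionLoopA, cmBr]
  | cons x r' ih =>
    intro p f s cnt hf hinv
    have hstep := inv_step hinv
    set k := PySem.Int.toStr x with hk
    set s1 := s.insert k (s.getD k 0 - 1) with hs1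
    set s2 := if s1.getD k 0 == 0 then s1.erase k else s1 with hs2
    have hinv2 : InvS s2 r' := hstep
    have hf' : PySem.Set.add f x = PySem.Set.ofList (p ++ [x]) := by
      rw [hf, PySem.Set.ofList_append_singleton]
    have hflen : (PySem.Set.add f x).length = Dl (p ++ [x]) := by rw [hf']; rfl
    have hsize : s2.size = Dl r' := size_of_inv hinv2
    show (if (PySem.Set.add f x).length == s2.size then
        solutionLoopA r' (PySem.Set.add f x) s2 (cnt + 1)
      else if s2.size < (PySem.Set.add f x).length then cnt
      else solutionLoopA r' (PySem.Set.add f x) s2 cnt) = cnt + (cmBr p (x :: r') : Int)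
    rw [hflen, hsize, cmBr]
    by_cases heq : Dl (p ++ [x]) = Dl r'
    · rw [if_pos (beq_iff_eq.mpr heq), if_pos heq, ih (p ++ [x]) _ _ _ hf' hinv2]
      push_cast; ring
    · rw [if_neg (by simp [heq]), if_neg heq]
      by_cases hlt : Dl r' < Dl (p ++ [x])
      · rw [if_pos hlt, if_pos hlt]; simp
      · rw [if_neg hlt, if_neg hlt, ih (p ++ [x]) _ _ _ hf' hinv2]
theorem ofList_singleton_len (x : Int) : (PySem.Set.ofList [x]).length = 1 := rfl

theorem solution_of_guard_false (topping : List Int) (hg : Dl topping ≠ 1) :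
    solution topping = solution_alt topping := by
  rw [solution_alt_eq]
  have hb : ((PySem.Set.ofList topping).length == 1) = false := by
    exact beq_eq_false_iff_ne.mpr hg
  simp only [solution, hb, Bool.false_eq_true, if_false]
  have hf0 : (PySem.Set.empty : PySem.Set Int) = PySem.Set.ofList [] := (PySem.Set.ofList_nil).symm
  rw [hf0, loopA_eq topping [] _ _ 0 rfl (inv_init topping), cmBr_eq_cmNB, Int.zero_add]
-- ===== VERDICT (by name: the statement is the Claim_ definition above) =====
theorem solution_spec : Claim_unchanged_solution := by
  intro topping _ hD
  by_cases hg : Dl topping = 1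
  · obtain ⟨hne, hall⟩ := allEq_of_Dl_one topping hg
    have hlen : topping.length < 2 := by
      by_contra h
      exact hD ⟨by omega, hall⟩
    have h0 : 0 < topping.length := List.length_pos_iff.mpr hne
    have hlen1 : topping.length = 1 := by omega
    obtain ⟨x, hx⟩ := List.length_eq_one_iff.mp hlen1
    subst hx
    have hb : ((PySem.Set.ofList [x]).length == 1) = true := by
      rw [ofList_singleton_len]; rfl
    have hA : solution [x] = 0 := by
      simp only [solution, ofList_singleton_len]
      norm_num
    rw [hA, solution_alt_eq]
    have hc : cmNB [] [x] = 0 := by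
      have hd1 : Dl ([] ++ [x]) = 1 := ofList_singleton_len x
      have hd0 : Dl ([] : List Int) = 0 := rfl
      rw [cmNB, if_neg (by omega), cmNB]
    rw [hc]; rfl
  · exact solution_of_guard_false topping hg

theorem solution_changed : Claim_changed_solution := by
  unfold Claim_changed_solution; decide

theorem solution_tight : Claim_exact_solution := by
  intro topping _ hD
  obtain ⟨hlen, hall⟩ := hD
  have hne : topping ≠ [] := by intro h; rw [h] at hlen; simp at hlen
  have hg : Dl topping = 1 := Dl_one_of_allEq topping hne hall
  have hb : ((PySem.Set.ofList topping).length == 1) = true := beq_iff_eq.mpr hg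
  have hA : solution topping = 0 := by
    simp only [solution, hb, if_true]
    rw [show (PySem.Set.ofList topping).length = 1 from hg]
    norm_num
  match topping, hlen, hall with
  | x :: y :: r, _, hall =>
    have hall' : ∀ a ∈ (y :: r), ∀ b ∈ (y :: r), a = b := by
      intro a ha b hb
      exact hall a (List.mem_cons_of_mem x ha) b (List.mem_cons_of_mem x hb)
    have hd1 : Dl ([] ++ [x]) = 1 := ofList_singleton_len x
    have hd2 : Dl (y :: r) = 1 := Dl_one_of_allEq _ (by simp) hall'
    have hc : cmNB [] (x :: y :: r) = 1 + cmNB ([] ++ [x]) (y :: r) := by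
      rw [cmNB, if_pos (by omega)]
    rw [hA, solution_alt_eq, hc]
    push_cast
    omega
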